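-- pv_equiv track=rewrite | github.com/secure-software-engineering/HeaderGen | evaluation/header_annotations/ck_score.py | get_high_level_phases
-- ===== SOURCE A (Python) =====
-- phase_groups = {
--     "Library Loading": ["Library Loading"],
--     "Visualization": ["Visualization"],
--     "Others": ["Others"],
--     "Data Preparation": ["Data Preparation", "Data Profiling and Exploratory Data Analysis" ,"Data Cleaning Filtering" ,"Data Sub-sampling and Train-test Splitting", "Data Loading"],
--     "Feature Engineering": ["Feature Engineering", "Feature Transformation", "Feature Selection"],
--     "Model Building and Training": ["Model Building and Training", "Model Training", "Model Parameter Tuning", "Model Validation and Assembling"]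
-- }
--
-- def get_high_level_phases(read_json):
--     high_level_combine = {}
--     for _k, _v in read_json.items():
--         high_level_combine[_k] = set()
--         for _cat in _v:
--             for _h_cat, h_cat_v in phase_groups.items():
--                 if _cat in h_cat_v:
--                     high_level_combine[_k].add(_h_cat)
--
--     return high_level_combine
-- ===== SOURCE B (Python) =====
-- phase_groups = {
--     "Library Loading": ["Library Loading"],
--     "Visualization": ["Visualization"],
--     "Others": ["Others"],
--     "Data Preparation": ["Data Preparation", "Data Profiling and Exploratory Data Analysis" ,"Data Cleaning Filtering" ,"Data Sub-sampling and Train-test Splitting", "Data Loading"],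
--     "Feature Engineering": ["Feature Engineering", "Feature Transformation", "Feature Selection"],
--     "Model Building and Training": ["Model Building and Training", "Model Training", "Model Parameter Tuning", "Model Validation and Assembling"]
-- }
--
-- # One-time reverse index: category -> its high-level phase.
-- CAT_TO_PHASE = {cat: phase for phase, cats in phase_groups.items() for cat in cats}
--
-- def _phases_of(cats):
--     acc = set()
--     for c in cats:
--         if c in CAT_TO_PHASE:
--             acc.add(CAT_TO_PHASE[c])
--     return acc
--
-- def get_high_level_phases(read_json):
--     return {k: _phases_of(v) for k, v in read_json.items()}
-- ===== Notes on version B (the rewrite author's own statement) =====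
-- stated objective: simpler
-- what changed: B is staged instead of one nested triple loop: it builds a reverse index (category -> phase) once, computes each key's whole phase set with a small helper, and assembles the result as a dict comprehension, so the inner scan over all phase groups and the repeated in-place dict mutation disappear.
import Mathlib
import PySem

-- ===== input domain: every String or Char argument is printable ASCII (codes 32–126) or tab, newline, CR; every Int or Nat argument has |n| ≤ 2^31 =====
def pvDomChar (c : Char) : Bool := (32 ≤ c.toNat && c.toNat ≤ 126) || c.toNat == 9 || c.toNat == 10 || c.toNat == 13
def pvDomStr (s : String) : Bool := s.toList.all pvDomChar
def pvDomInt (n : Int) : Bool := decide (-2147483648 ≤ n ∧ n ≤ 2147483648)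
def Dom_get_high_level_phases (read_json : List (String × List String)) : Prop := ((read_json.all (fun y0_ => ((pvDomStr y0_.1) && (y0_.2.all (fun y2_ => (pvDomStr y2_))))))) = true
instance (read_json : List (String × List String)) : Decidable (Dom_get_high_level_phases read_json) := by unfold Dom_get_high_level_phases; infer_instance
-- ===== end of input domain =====

-- B stages the work (one-time reverse index, a helper computing each key's whole phase set, a dict comprehension) instead of A's nested triple loop mutating one dict (objective: simpler).

-- ===== PORT A =====
-- module-level constant phase_groups (dict -> association list)
def pv_phase_groups : List (String × List String) :=
  [("Library Loading", ["Library Loading"]),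
   ("Visualization", ["Visualization"]),
   ("Others", ["Others"]),
   ("Data Preparation", ["Data Preparation", "Data Profiling and Exploratory Data Analysis", "Data Cleaning Filtering", "Data Sub-sampling and Train-test Splitting", "Data Loading"]),
   ("Feature Engineering", ["Feature Engineering", "Feature Transformation", "Feature Selection"]),
   ("Model Building and Training", ["Model Building and Training", "Model Training", "Model Parameter Tuning", "Model Validation and Assembling"])]

-- innermost loop of A: for _h_cat, h_cat_v in phase_groups.items(): if _cat in h_cat_v: high_level_combine[_k].add(_h_cat)
def pvA_cat (k : String) (hlc : PySem.Dict String (List String)) (cat : String) : PySem.Dict String (List String) :=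
  pv_phase_groups.foldl
    (fun hlc g => if cat ∈ g.2 then hlc.modify k [] (fun s => PySem.Set.add s g.1) else hlc) hlc

-- body of A's outer loop: high_level_combine[_k] = set(); for _cat in _v: …
def pvA_step (hlc : PySem.Dict String (List String)) (kv : String × List String) : PySem.Dict String (List String) :=
  kv.2.foldl (pvA_cat kv.1) (hlc.insert kv.1 [])

def get_high_level_phases (read_json : List (String × List String)) : List (String × List String) :=
  (read_json.foldl pvA_step PySem.Dict.empty).items

-- ===== PORT B =====
-- CAT_TO_PHASE = {cat: phase for phase, cats in phase_groups.items() for cat in cats}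
def pvCatToPhase : PySem.Dict String String :=
  pv_phase_groups.foldl (fun d g => g.2.foldl (fun d c => d.insert c g.1) d) PySem.Dict.empty

-- _phases_of: acc = set(); for c in cats: if c in CAT_TO_PHASE: acc.add(CAT_TO_PHASE[c]); return acc
def pvPhasesOf (cats : List String) : List String :=
  cats.foldl
    (fun acc c =>
      match pvCatToPhase.get? c with
      | some h => PySem.Set.add acc h
      | none => acc) []

-- {k: _phases_of(v) for k, v in read_json.items()}  (dict comprehension = fold of insert)
def get_high_level_phases_alt (read_json : List (String × List String)) : List (String × List String) :=
  (read_json.foldl (fun d kv => d.insert kv.1 (pvPhasesOf kv.2)) PySem.Dict.empty).items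

-- ===== PRECONDITION & SPEC =====
def Spec_get_high_level_phases (read_json : List (String × List String)) (out : List (String × List String)) : Prop := out = get_high_level_phases_alt read_json
instance (read_json : List (String × List String)) (out : List (String × List String)) : Decidable (Spec_get_high_level_phases read_json out) := by unfold Spec_get_high_level_phases; infer_instance

-- ===== CLAIM (what is proved, stated in full; the proofs are below) =====
def Claim_equal_get_high_level_phases : Prop := ∀ (read_json : List (String × List String)), Dom_get_high_level_phases read_json → Spec_get_high_level_phases read_json (get_high_level_phases read_json)

-- ===== LEMMAS AND PROOFS =====

-- the per-category set update both algorithms amount to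
def pvSetStep (s : List String) (cat : String) : List String :=
  match pvCatToPhase.get? cat with
  | some h => PySem.Set.add s h
  | none => s

-- A's scan over the six constant groups, applied at key k, is one modify by pvSetStep when the category
-- is known and a no-op otherwise (matching the reverse-index lookup)
theorem pvA_cat_char (k : String) (hlc : PySem.Dict String (List String)) (cat : String) :
    pvA_cat k hlc cat =
      match pvCatToPhase.get? cat with
      | some h => hlc.modify k [] (fun s => PySem.Set.add s h)
      | none => hlc := by
  by_cases h1 : cat = "Library Loading"
  · subst h1; rfl
  by_cases h2 : cat = "Visualization"
  · subst h2; rfl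
  by_cases h3 : cat = "Others"
  · subst h3; rfl
  by_cases h4 : cat = "Data Preparation"
  · subst h4; rfl
  by_cases h5 : cat = "Data Profiling and Exploratory Data Analysis"
  · subst h5; rfl
  by_cases h6 : cat = "Data Cleaning Filtering"
  · subst h6; rfl
  by_cases h7 : cat = "Data Sub-sampling and Train-test Splitting"
  · subst h7; rfl
  by_cases h8 : cat = "Data Loading"
  · subst h8; rfl
  by_cases h9 : cat = "Feature Engineering"
  · subst h9; rfl
  by_cases h10 : cat = "Feature Transformation"
  · subst h10; rfl
  by_cases h11 : cat = "Feature Selection"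
  · subst h11; rfl
  by_cases h12 : cat = "Model Building and Training"
  · subst h12; rfl
  by_cases h13 : cat = "Model Training"
  · subst h13; rfl
  by_cases h14 : cat = "Model Parameter Tuning"
  · subst h14; rfl
  by_cases h15 : cat = "Model Validation and Assembling"
  · subst h15; rfl
  ·
    have e1 : ("Library Loading" == cat) = false := beq_eq_false_iff_ne.mpr (Ne.symm h1)
    have e2 : ("Visualization" == cat) = false := beq_eq_false_iff_ne.mpr (Ne.symm h2)
    have e3 : ("Others" == cat) = false := beq_eq_false_iff_ne.mpr (Ne.symm h3)
    have e4 : ("Data Preparation" == cat) = false := beq_eq_false_iff_ne.mpr (Ne.symm h4)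
    have e5 : ("Data Profiling and Exploratory Data Analysis" == cat) = false := beq_eq_false_iff_ne.mpr (Ne.symm h5)
    have e6 : ("Data Cleaning Filtering" == cat) = false := beq_eq_false_iff_ne.mpr (Ne.symm h6)
    have e7 : ("Data Sub-sampling and Train-test Splitting" == cat) = false := beq_eq_false_iff_ne.mpr (Ne.symm h7)
    have e8 : ("Data Loading" == cat) = false := beq_eq_false_iff_ne.mpr (Ne.symm h8)
    have e9 : ("Feature Engineering" == cat) = false := beq_eq_false_iff_ne.mpr (Ne.symm h9)
    have e10 : ("Feature Transformation" == cat) = false := beq_eq_false_iff_ne.mpr (Ne.symm h10)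
    have e11 : ("Feature Selection" == cat) = false := beq_eq_false_iff_ne.mpr (Ne.symm h11)
    have e12 : ("Model Building and Training" == cat) = false := beq_eq_false_iff_ne.mpr (Ne.symm h12)
    have e13 : ("Model Training" == cat) = false := beq_eq_false_iff_ne.mpr (Ne.symm h13)
    have e14 : ("Model Parameter Tuning" == cat) = false := beq_eq_false_iff_ne.mpr (Ne.symm h14)
    have e15 : ("Model Validation and Assembling" == cat) = false := beq_eq_false_iff_ne.mpr (Ne.symm h15)
    simp [pvA_cat, pvCatToPhase, pv_phase_groups, PySem.Dict.get?,
      PySem.Dict.insert, PySem.Dict.empty, List.find?, h1, h2, h3, h4, h5, h6, h7, h8,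
      h9, h10, h11, h12, h13, h14, h15, e1, e2, e3, e4, e5, e6, e7, e8, e9, e10, e11,
      e12, e13, e14, e15]

-- modify at a key that was just inserted rewrites that entry in place
theorem modify_insert_self (d : PySem.Dict String (List String)) (k : String) (x : List String)
    (f : List String → List String) :
    (d.insert k x).modify k [] f = d.insert k (f x) := by
  show (d.insert k x).insert k (f ((d.insert k x).getD k [])) = d.insert k (f x)
  rw [PySem.Dict.getD_insert_self, PySem.Dict.insert_insert_self]

-- A's interleaved per-category modifies at key k amount to inserting the fully computed set once
theorem foldl_pvA_cat (cats : List String) (d : PySem.Dict String (List String)) (k : String)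
    (x : List String) :
    cats.foldl (pvA_cat k) (d.insert k x) = d.insert k (cats.foldl pvSetStep x) := by
  induction cats generalizing x with
  | nil => rfl
  | cons c cs ih =>
      simp only [List.foldl_cons, pvA_cat_char, pvSetStep]
      cases pvCatToPhase.get? c with
      | some h => dsimp only; rw [modify_insert_self]; exact ih _
      | none => dsimp only; exact ih _

theorem pvA_step_eq (hlc : PySem.Dict String (List String)) (kv : String × List String) :
    pvA_step hlc kv = hlc.insert kv.1 (pvPhasesOf kv.2) := by
  unfold pvA_step pvPhasesOf
  rw [foldl_pvA_cat]
  rfl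

-- ===== VERDICT (by name: the statement is the Claim_ definition above) =====
theorem get_high_level_phases_spec : Claim_equal_get_high_level_phases := by
  intro read_json _
  unfold Spec_get_high_level_phases get_high_level_phases get_high_level_phases_alt
  have h : pvA_step = fun d kv => d.insert kv.1 (pvPhasesOf kv.2) :=
    funext fun d => funext fun kv => pvA_step_eq d kv
  rw [h]
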